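-- pv_equiv track=rewrite | github.com/BrianGMcEnery/vedmath-python | notebooks/vedmath/vnumbers.py | _to_vinculum
-- ===== SOURCE A (Python) =====
-- def all_from_9_last_from_10(ds):
--     '''Apply the sutra to a list of digits'''
--     def all_from_9(d):
--         return 9 - d
--     def last_from_10(d):
--         return 10 - d
--
--     ans = [all_from_9(d) for d in ds[:-1]]
--     ans = ans + [last_from_10(ds[-1])]
--     return ans
--
-- def find_truth_changes(truth_values):
--     '''Find out where the truth values change'''
--     changes = [0]
--     current = truth_values[0]
--     try:
--         while True:
--             idx = truth_values.index(not current, changes[-1])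
--             changes.append(idx)
--             current = not current
--     except:
--         return changes
--
-- def negate_digits(ds):
--     '''Negate a list of digits'''
--     return [-d for d in ds]
--
-- def _to_vinculum(ds):
--     '''
--     Returns the digits ds in vinculum form.
--     '''
--
--     def one_more_than_list(ds):
--         '''Apply one_more_than to the last element of a list'''
--         if ds == []:
--             return [1]
--         else:
--             ds[-1] += 1
--             return ds
--
--     truth_values = [e > 5 for e in ds]
--     change_indxs = find_truth_changes(truth_values)
--
--     #special case to handle the first element
--     if truth_values[0]: #the first element is > 5
--         ans = [1]
--     else:
--         ans = []
--
--     idx = 0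
--     try:
--         while True:
--             ci = change_indxs[idx]
--             cip1 = change_indxs[idx+1]
--             if truth_values[ci]: #the element is > 5
--                 ans += negate_digits(all_from_9_last_from_10(ds[ci:cip1]))
--             else:
--                 ans += one_more_than_list(ds[ci:cip1])
--             idx += 1
--     except:
--         #handle the final change
--         ci = change_indxs[idx]
--         if truth_values[ci]: #the element is > 5
--                 ans += negate_digits(all_from_9_last_from_10(ds[ci:]))
--         else:
--             ans += ds[ci:]
--         return ans
-- ===== SOURCE B (Python) =====
-- def _to_vinculum(ds):
--     '''
--     Returns the digits ds in vinculum form.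
--     Single right-to-left carry pass instead of the truth-segment machinery.
--     '''
--     out = []
--     carry = 0
--     for d in reversed(ds):
--         if d > 5:
--             out.append(d + carry - 10)
--             carry = 1
--         else:
--             out.append(d + carry)
--             carry = 0
--     if carry:
--         out.append(1)
--     out.reverse()
--     return out
-- ===== Notes on version B (the rewrite author's own statement) =====
-- stated objective: simpler
-- what changed: Replaced the truth_values/find_truth_changes/segment-slicing machinery with a single right-to-left carry pass (carry decided by the pre-carry d>5 test), appending the digits and a possible leading 1, then reversing.
import Mathlib
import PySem

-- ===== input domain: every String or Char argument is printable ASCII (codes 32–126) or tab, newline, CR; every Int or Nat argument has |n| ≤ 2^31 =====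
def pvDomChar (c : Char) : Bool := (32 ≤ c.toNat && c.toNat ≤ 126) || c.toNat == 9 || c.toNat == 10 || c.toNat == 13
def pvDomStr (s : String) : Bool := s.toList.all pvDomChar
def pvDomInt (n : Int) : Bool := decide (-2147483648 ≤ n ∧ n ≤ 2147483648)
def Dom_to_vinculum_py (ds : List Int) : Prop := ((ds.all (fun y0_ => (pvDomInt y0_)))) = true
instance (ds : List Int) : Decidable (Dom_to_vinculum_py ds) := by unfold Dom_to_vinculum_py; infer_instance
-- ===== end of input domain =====

-- B replaces A's truth-segment machinery by a single right-to-left carry pass (objective: simpler).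

-- ===== PORT A =====
-- helper all_from_9_last_from_10: ds[:-1] is dropLast, ds[-1] is getLastD 0
-- (only ever applied to nonempty segments, where getLastD agrees with Python's ds[-1])
def all_from_9_last_from_10 (ds : List Int) : List Int :=
  ds.dropLast.map (fun d => 9 - d) ++ [10 - ds.getLastD 0]

-- truth_values.index(not current, start): first index ≥ start holding the value
def indexFrom (tv : List Bool) (b : Bool) (s : Nat) : Option Nat :=
  ((tv.drop s).idxOf? b).map (fun i => s + i)

-- the while-True/except loop of find_truth_changes; each found index is strictly
-- larger than the previous one, so tv.length steps of fuel always suffice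
def ftcLoop : Nat → List Nat → Bool → List Bool → List Nat
  | 0, changes, _, _ => changes
  | fuel+1, changes, current, tv =>
    match indexFrom tv (!current) (changes.getLastD 0) with
    | some idx => ftcLoop fuel (changes ++ [idx]) (!current) tv
    | none => changes

def find_truth_changes (tv : List Bool) : List Nat :=
  ftcLoop tv.length [0] (tv.headD false) tv

def negate_digits (ds : List Int) : List Int := ds.map (fun d => -d)

def one_more_than_list (ds : List Int) : List Int :=
  match ds with
  | [] => [1]
  | _ => ds.dropLast ++ [ds.getLastD 0 + 1]

-- the idx-indexed while-True/except loop over change_indxs, as structural recursion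
-- over the suffix of change_indxs; ds[ci:cip1] = (ds.drop ci).take (cip1 - ci) (indices are Nats here)
def vloop (ds : List Int) (tv : List Bool) : List Nat → List Int
  | ci :: cip1 :: rest =>
    (if tv.getD ci false then
       negate_digits (all_from_9_last_from_10 ((ds.drop ci).take (cip1 - ci)))
     else
       one_more_than_list ((ds.drop ci).take (cip1 - ci)))
    ++ vloop ds tv (cip1 :: rest)
  | [ci] =>
    if tv.getD ci false then negate_digits (all_from_9_last_from_10 (ds.drop ci))
    else ds.drop ci
  | [] => []

def to_vinculum_py (ds : List Int) : List Int :=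
  let truth_values := ds.map (fun e => decide (e > 5))
  let change_indxs := find_truth_changes truth_values
  let ans := if truth_values.headD false then [1] else ([] : List Int)
  ans ++ vloop ds truth_values change_indxs

-- ===== PORT B =====
-- loop body of Source B: state (out, carry); out grows at the back, reversed at the end
def altStep (acc : List Int × Int) (d : Int) : List Int × Int :=
  if d > 5 then (acc.1 ++ [d + acc.2 - 10], 1) else (acc.1 ++ [d + acc.2], 0)

def to_vinculum_py_alt (ds : List Int) : List Int :=
  let p := ds.reverse.foldl altStep ([], 0)
  let out := if p.2 ≠ 0 then p.1 ++ [1] else p.1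
  out.reverse

-- ===== PRECONDITION & SPEC =====
-- Pre_ excludes only the empty list, on which A raises IndexError (truth_values[0]).
def Pre_to_vinculum_py (ds : List Int) : Prop := ds ≠ []
instance (ds : List Int) : Decidable (Pre_to_vinculum_py ds) := by unfold Pre_to_vinculum_py; infer_instance

def pvWitness_to_vinculum_py : List Int := [1, 7, 4, 9]

def Spec_to_vinculum_py (ds : List Int) (out : List Int) : Prop := out = to_vinculum_py_alt ds
instance (ds : List Int) (out : List Int) : Decidable (Spec_to_vinculum_py ds out) := by unfold Spec_to_vinculum_py; infer_instance

-- ===== CLAIM (what is proved, stated in full; the proofs are below) =====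
def Claim_equal_to_vinculum_py : Prop := ∀ (ds : List Int), Dom_to_vinculum_py ds → Pre_to_vinculum_py ds → Spec_to_vinculum_py ds (to_vinculum_py ds)

-- ===== LEMMAS AND PROOFS =====

-- reference right-to-left carry recursion: F2 t c = (digits of t with incoming carry c from the right, outgoing carry)
def F2 : List Int → Int → List Int × Int
  | [], c => ([], c)
  | d :: t, c =>
    let r := F2 t c
    if d > 5 then ((d + r.2 - 10) :: r.1, 1) else ((d + r.2) :: r.1, 0)

-- abstract change-index scan: chg s c t = flip positions of t (offset s, current value c)
def chg : Nat → Bool → List Bool → List Nat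
  | _, _, [] => []
  | s, c, b :: t => if b = c then chg (s+1) c t else s :: chg (s+1) b t

theorem F2_snd (d : Int) (t : List Int) (c : Int) :
    (F2 (d :: t) c).2 = if d > 5 then 1 else 0 := by
  simp only [F2]; split_ifs <;> rfl

theorem F2_append (l r : List Int) (c : Int) :
    F2 (l ++ r) c = ((F2 l (F2 r c).2).1 ++ (F2 r c).1, (F2 l (F2 r c).2).2) := by
  induction l with
  | nil => simp [F2]
  | cons d t ih => simp only [List.cons_append, F2, ih]; split_ifs <;> rfl

theorem runLow (seg : List Int) (c : Int) (h : ∀ d ∈ seg, ¬ d > 5) (hne : seg ≠ []) :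
    F2 seg c = (seg.dropLast ++ [seg.getLastD 0 + c], 0) := by
  induction seg with
  | nil => exact absurd rfl hne
  | cons d t ih =>
    have hd : ¬ d > 5 := h d (by simp)
    cases t with
    | nil => simp [F2, hd]
    | cons e u =>
      have ht := ih (fun x hx => h x (by simp [hx])) (by simp)
      have step : F2 (d :: e :: u) c = ((d + (F2 (e :: u) c).2) :: (F2 (e :: u) c).1, 0) := by
        simp only [F2]; rw [if_neg hd]
      rw [step, ht]
      simp [List.getLastD]

theorem runHigh (seg : List Int) (h : ∀ d ∈ seg, d > 5) (hne : seg ≠ []) :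
    F2 seg 0 = (negate_digits (all_from_9_last_from_10 seg), 1) := by
  induction seg with
  | nil => exact absurd rfl hne
  | cons d t ih =>
    have hd : d > 5 := h d (by simp)
    cases t with
    | nil =>
      simp [F2, hd, negate_digits, all_from_9_last_from_10]
      try omega
    | cons e u =>
      have ht := ih (fun x hx => h x (by simp [hx])) (by simp)
      have step : F2 (d :: e :: u) 0 = ((d + (F2 (e :: u) 0).2 - 10) :: (F2 (e :: u) 0).1, 1) := by
        simp only [F2]; rw [if_pos hd]
      rw [step, ht]
      simp only [negate_digits, all_from_9_last_from_10, List.dropLast_cons₂, List.map_cons,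
        List.map_append, List.cons_append, List.getLastD_cons]
      have harith : d + 1 - 10 = -(9 - d) := by omega
      rw [harith]

theorem B_eq (ds : List Int) :
    to_vinculum_py_alt ds = if (F2 ds 0).2 ≠ 0 then 1 :: (F2 ds 0).1 else (F2 ds 0).1 := by
  unfold to_vinculum_py_alt
  have key : ∀ (l : List Int) (c : Int),
      l.foldr (fun x y => altStep y x) ([], c) = ((F2 l c).1.reverse, (F2 l c).2) := by
    intro l
    induction l with
    | nil => intro c; simp [F2]
    | cons d t ih =>
      intro c
      rw [List.foldr_cons, ih c]
      simp only [altStep, F2]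
      split_ifs <;> simp
  rw [List.foldl_reverse, key ds 0]
  by_cases h : (F2 ds 0).2 = 0 <;> simp [h]

theorem chg_all_eq (s : Nat) (c : Bool) (t : List Bool) (h : ∀ b ∈ t, b = c) :
    chg s c t = [] := by
  induction t generalizing s with
  | nil => rfl
  | cons b u ih =>
    have hb : b = c := h b (by simp)
    simp only [chg, if_pos hb]
    exact ih (s+1) (fun x hx => h x (by simp [hx]))

theorem chg_run (k : Nat) (s : Nat) (c : Bool) (t : List Bool) :
    chg s c (List.replicate k c ++ t) = chg (s + k) c t := by
  induction k generalizing s with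
  | zero => simp
  | succ m ih =>
    rw [List.replicate_succ, List.cons_append]
    show (if c = c then chg (s+1) c (List.replicate m c ++ t) else s :: chg (s+1) c (List.replicate m c ++ t)) = chg (s + (m+1)) c t
    rw [if_pos rfl, ih (s+1)]
    congr 1
    omega

theorem flip_decomp (c : Bool) (t : List Bool) (h : ¬ ∀ b ∈ t, b = c) :
    ∃ k rest, t = List.replicate k c ++ (!c) :: rest := by
  induction t with
  | nil => exact absurd (by simp) h
  | cons b u ih =>
    by_cases hb : b = c
    · have : ¬ ∀ x ∈ u, x = c := fun hall => h (fun x hx => by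
        rcases List.mem_cons.mp hx with h1 | h2
        · rw [h1, hb]
        · exact hall x h2)
      obtain ⟨k, rest, hkr⟩ := ih this
      exact ⟨k+1, rest, by simp [List.replicate_succ, hkr, hb]⟩
    · have hb' : b = !c := by cases b <;> cases c <;> simp_all
      exact ⟨0, u, by simp [hb']⟩

theorem idxOf?_replicate_append (k : Nat) (c : Bool) (rest : List Bool) :
    (List.replicate k c ++ (!c) :: rest).idxOf? (!c) = some k := by
  induction k with
  | zero => simp [List.idxOf?_cons]
  | succ m ih =>
    rw [List.replicate_succ, List.cons_append]
    have hne : (c == !c) = false := by cases c <;> rfl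
    simp [List.idxOf?_cons, hne, ih]

theorem idxOf?_all_ne (c : Bool) (t : List Bool) (h : ∀ b ∈ t, b = c) :
    t.idxOf? (!c) = none := by
  induction t with
  | nil => rfl
  | cons b u ih =>
    have hb : b = c := h b (by simp)
    have hne : (b == !c) = false := by subst hb; cases b <;> rfl
    simp [List.idxOf?_cons, hne, ih (fun x hx => h x (by simp [hx]))]

theorem ftcL (fuel : Nat) : ∀ (tv : List Bool) (s : Nat) (ch : List Nat) (c : Bool),
    tv.length - s ≤ fuel → ch.getLastD 0 = s → tv.drop s = c :: tv.drop (s+1) →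
    ftcLoop fuel ch c tv = ch ++ chg (s+1) c (tv.drop (s+1)) := by
  induction fuel with
  | zero =>
    intro tv s ch c hf hl hd
    have hlen := congrArg List.length hd
    simp [List.length_drop] at hlen
    omega
  | succ f ih =>
    intro tv s ch c hf hl hd
    have hs : s < tv.length := by
      have hlen := congrArg List.length hd
      simp [List.length_drop] at hlen
      omega
    by_cases hall : ∀ b ∈ tv.drop (s+1), b = c
    · have hidx : indexFrom tv (!c) s = none := by
        unfold indexFrom
        rw [hd]
        have hnone : (c :: tv.drop (s+1)).idxOf? (!c) = none := by
          apply idxOf?_all_ne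
          intro b hb
          rcases List.mem_cons.mp hb with h1 | h1
          · exact h1
          · exact hall b h1
        rw [hnone]
        rfl
      simp only [ftcLoop]
      rw [hl, hidx]
      rw [chg_all_eq _ _ _ hall]
      simp
    · obtain ⟨k, rest, hkr⟩ := flip_decomp c _ hall
      have hidx : indexFrom tv (!c) s = some (s+k+1) := by
        unfold indexFrom
        rw [hd, hkr]
        have hrepl : (c :: (List.replicate k c ++ (!c) :: rest))
            = List.replicate (k+1) c ++ (!c) :: rest := by
          simp [List.replicate_succ]
        rw [hrepl, idxOf?_replicate_append]
        rfl
      have hdrop1 : tv.drop (s+k+1) = (!c) :: rest := by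
        have h1 : tv.drop (s+k+1) = (tv.drop (s+1)).drop k := by
          rw [List.drop_drop]; congr 1; omega
        rw [h1, hkr, List.drop_left']
        exact List.length_replicate ..
      have hdrop2 : tv.drop (s+k+1+1) = rest := by
        have h1 : tv.drop (s+k+1+1) = (tv.drop (s+k+1)).drop 1 := by
          rw [List.drop_drop, Nat.add_assoc]
        rw [h1, hdrop1]
        rfl
      simp only [ftcLoop]
      rw [hl, hidx]
      show ftcLoop f (ch ++ [s+k+1]) (!c) tv = ch ++ chg (s+1) c (tv.drop (s+1))
      rw [ih tv (s+k+1) (ch ++ [s+k+1]) (!c) (by omega) (by simp) (by rw [hdrop1, hdrop2])]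
      rw [hdrop2, hkr, chg_run]
      have e1 : s+1+k = s+k+1 := by omega
      rw [e1]
      have hstep : chg (s+k+1) c ((!c) :: rest) = (s+k+1) :: chg (s+k+1+1) (!c) rest := by
        show (if (!c) = c then chg (s+k+1+1) c rest else (s+k+1) :: chg (s+k+1+1) (!c) rest) = _
        rw [if_neg (by cases c <;> simp)]
      rw [hstep]
      simp

theorem map_eq_replicate_forall {α : Type} (f : α → Bool) (l : List α) (n : Nat) (c : Bool)
    (h : l.map f = List.replicate n c) : ∀ d ∈ l, f d = c := by
  induction l generalizing n with
  | nil => intro d hd; simp at hd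
  | cons a l ih =>
    cases n with
    | zero => simp at h
    | succ m =>
      rw [List.map_cons, List.replicate_succ] at h
      intro d hd
      rcases List.mem_cons.mp hd with h3 | h3
      · subst h3; exact (List.cons.inj h).1
      · exact ih m (List.cons.inj h).2 d h3

theorem chg_flip (s : Nat) (c : Bool) (t : List Bool) :
    chg s c ((!c) :: t) = s :: chg (s+1) (!c) t := by
  show (if (!c) = c then chg (s+1) c t else s :: chg (s+1) (!c) t) = _
  rw [if_neg (by cases c <;> simp)]

theorem getD_of_drop (l : List Bool) (s : Nat) (x : Bool) (r : List Bool)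
    (h : l.drop s = x :: r) : l.getD s false = x := by
  have h2 : (l.drop s).head? = some x := by rw [h]; rfl
  rw [List.head?_drop] at h2
  simp [List.getD_eq_getElem?_getD, h2]

theorem dropLast_append_getLastD (l : List Int) (h : l ≠ []) :
    l.dropLast ++ [l.getLastD 0] = l := by
  rw [List.getLastD_eq_getLast?, List.getLast?_eq_some_getLast h]
  simp [List.dropLast_append_getLast h]

theorem runLow0 (seg : List Int) (h : ∀ d ∈ seg, ¬ d > 5) (hne : seg ≠ []) :
    F2 seg 0 = (seg, 0) := by
  rw [runLow seg 0 h hne]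
  rw [show seg.getLastD 0 + 0 = seg.getLastD 0 from by ring]
  rw [dropLast_append_getLastD seg hne]

theorem omtl_eq (seg : List Int) (hne : seg ≠ []) :
    one_more_than_list seg = seg.dropLast ++ [seg.getLastD 0 + 1] := by
  cases seg with
  | nil => exact absurd rfl hne
  | cons a t => rfl

theorem vloopL (n : Nat) : ∀ (ds : List Int) (s : Nat) (c : Bool),
    ds.length - s ≤ n →
    (ds.map (fun e => decide (e > 5))).drop s = c :: (ds.map (fun e => decide (e > 5))).drop (s+1) →
    vloop ds (ds.map (fun e => decide (e > 5)))
      (s :: chg (s+1) c ((ds.map (fun e => decide (e > 5))).drop (s+1)))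
      = (F2 (ds.drop s) 0).1 := by
  induction n with
  | zero =>
    intro ds s c hn hd
    have hlen := congrArg List.length hd
    simp at hlen
    omega
  | succ m ih =>
    intro ds s c hn hd
    have hlen := congrArg List.length hd
    simp at hlen
    have hu : (ds.drop s).map (fun e => decide (e > 5))
        = c :: (ds.map (fun e => decide (e > 5))).drop (s+1) := by
      rw [List.map_drop]; exact hd
    have hune : ds.drop s ≠ [] := by
      intro h0; rw [h0] at hu; simp at hu
    have hgetd : (ds.map (fun e => decide (e > 5))).getD s false = c := getD_of_drop _ _ _ _ hd
    by_cases hall : ∀ b ∈ (ds.map (fun e => decide (e > 5))).drop (s+1), b = c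
    · rw [chg_all_eq _ _ _ hall]
      have hallu : ∀ d ∈ ds.drop s, decide (d > 5) = c := by
        intro d hdm
        have hmem : decide (d > 5) ∈ (ds.drop s).map (fun e => decide (e > 5)) :=
          List.mem_map_of_mem hdm
        rw [hu] at hmem
        rcases List.mem_cons.mp hmem with h1 | h1
        · exact h1
        · exact hall _ h1
      simp only [vloop, hgetd]
      cases c
      · rw [if_neg (by simp)]
        rw [runLow0 (ds.drop s) (fun d hdm => by simpa using hallu d hdm) hune]
      · rw [if_pos rfl]
        rw [runHigh (ds.drop s) (fun d hdm => by simpa using hallu d hdm) hune]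
    · obtain ⟨k, rest, hkr⟩ := flip_decomp c _ hall
      have e1 : s+1+k = s+k+1 := by omega
      rw [hkr, chg_run, e1, chg_flip]
      have humap : (ds.drop s).map (fun e => decide (e > 5))
          = List.replicate (k+1) c ++ (!c) :: rest := by
        rw [hu, hkr]; simp [List.replicate_succ]
      have hulen : (ds.drop s).length = (k+1) + (rest.length + 1) := by
        have := congrArg List.length humap
        simpa using this
      have hsegmap : ((ds.drop s).take (k+1)).map (fun e => decide (e > 5))
          = List.replicate (k+1) c := by
        rw [List.map_take, humap, List.take_left']
        exact List.length_replicate ..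
      have hsegall : ∀ d ∈ (ds.drop s).take (k+1), decide (d > 5) = c :=
        map_eq_replicate_forall _ _ _ _ hsegmap
      have hsegne : (ds.drop s).take (k+1) ≠ [] := by
        intro h0
        have := congrArg List.length h0
        simp [hulen] at this
      have hdropds : ds.drop (s+k+1) = (ds.drop s).drop (k+1) := by
        rw [List.drop_drop, Nat.add_assoc]
      have hsplit : (ds.drop s).take (k+1) ++ ds.drop (s+k+1) = ds.drop s := by
        rw [hdropds]; exact List.take_append_drop _ _
      have hdmap : (ds.drop (s+k+1)).map (fun e => decide (e > 5)) = (!c) :: rest := by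
        rw [hdropds, List.map_drop, humap, List.drop_left']
        exact List.length_replicate ..
      have hrest2 : (ds.map (fun e => decide (e > 5))).drop (s+k+1+1) = rest := by
        have h1 : (ds.map (fun e => decide (e > 5))).drop (s+k+1+1)
            = ((ds.drop (s+k+1)).map (fun e => decide (e > 5))).drop 1 := by
          rw [List.map_drop, List.drop_drop]
        rw [h1, hdmap]
        rfl
      have hdd : (ds.map (fun e => decide (e > 5))).drop (s+k+1)
          = (!c) :: (ds.map (fun e => decide (e > 5))).drop (s+k+1+1) := by
        rw [hrest2, ← List.map_drop, hdmap]
      have hrec := ih ds (s+k+1) (!c) (by omega) hdd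
      rw [hrest2] at hrec
      simp only [vloop, hgetd]
      have e2 : s+k+1-s = k+1 := by omega
      rw [e2, hrec]
      have hF : F2 (ds.drop s) 0
          = ((F2 ((ds.drop s).take (k+1)) ((F2 (ds.drop (s+k+1)) 0).2)).1
              ++ (F2 (ds.drop (s+k+1)) 0).1,
             (F2 ((ds.drop s).take (k+1)) ((F2 (ds.drop (s+k+1)) 0).2)).2) := by
        conv_lhs => rw [← hsplit]
        exact F2_append _ _ 0
      obtain ⟨d', t', hshape⟩ : ∃ d' t', ds.drop (s+k+1) = d' :: t' := by
        cases h0 : ds.drop (s+k+1) with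
        | nil => rw [h0] at hdmap; simp at hdmap
        | cons a b => exact ⟨a, b, rfl⟩
      rw [hshape] at hdmap
      simp only [List.map_cons] at hdmap
      have hd' : decide (d' > 5) = !c := (List.cons.inj hdmap).1
      cases c
      · rw [if_neg (by simp)]
        have h5 : d' > 5 := by simpa using hd'
        have hc2 : (F2 (ds.drop (s+k+1)) 0).2 = 1 := by
          rw [hshape, F2_snd, if_pos h5]
        rw [hF, hc2]
        rw [runLow ((ds.drop s).take (k+1)) 1
          (fun d hdm => by simpa using hsegall d hdm) hsegne]
        rw [omtl_eq _ hsegne]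
      · rw [if_pos rfl]
        have h5 : ¬ d' > 5 := by simpa using hd'
        have hc2 : (F2 (ds.drop (s+k+1)) 0).2 = 0 := by
          rw [hshape, F2_snd, if_neg h5]
        rw [hF, hc2]
        rw [runHigh ((ds.drop s).take (k+1))
          (fun d hdm => by simpa using hsegall d hdm) hsegne]

theorem A_eq (ds : List Int) (h : ds ≠ []) :
    to_vinculum_py ds = if (F2 ds 0).2 ≠ 0 then 1 :: (F2 ds 0).1 else (F2 ds 0).1 := by
  obtain ⟨d, t, rfl⟩ : ∃ d t, ds = d :: t := by
    cases ds with
    | nil => exact absurd rfl h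
    | cons a b => exact ⟨a, b, rfl⟩
  have hdrop : (List.map (fun e => decide (e > 5)) (d :: t)).drop 0
      = decide (d > 5) :: (List.map (fun e => decide (e > 5)) (d :: t)).drop 1 := by
    simp
  have hftc : find_truth_changes (List.map (fun e => decide (e > 5)) (d :: t))
      = 0 :: chg 1 (decide (d > 5)) (List.map (fun e => decide (e > 5)) t) := by
    unfold find_truth_changes
    have hloop := ftcL (List.map (fun e => decide (e > 5)) (d :: t)).length
      (List.map (fun e => decide (e > 5)) (d :: t)) 0 [0] (decide (d > 5))
      (by omega) rfl hdrop
    simpa using hloop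
  have hvl := vloopL (d :: t).length (d :: t) 0 (decide (d > 5)) (by omega) hdrop
  simp only [List.drop_succ_cons, List.drop_zero, List.map_cons, Nat.zero_add] at hvl
  unfold to_vinculum_py
  simp only [List.map_cons, List.headD_cons]
  rw [show find_truth_changes (decide (d > 5) :: List.map (fun e => decide (e > 5)) t)
      = 0 :: chg 1 (decide (d > 5)) (List.map (fun e => decide (e > 5)) t) from by
    simpa using hftc]
  rw [hvl]
  by_cases h5 : d > 5
  · have h2 : (F2 (d :: t) 0).2 = 1 := by rw [F2_snd, if_pos h5]
    simp [h5, h2]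
  · have h2 : (F2 (d :: t) 0).2 = 0 := by rw [F2_snd, if_neg h5]
    simp [h5, h2]

-- ===== VERDICT (by name: the statement is the Claim_ definition above) =====
theorem to_vinculum_py_spec : Claim_equal_to_vinculum_py := by
  intro ds _ hpre
  unfold Spec_to_vinculum_py
  rw [A_eq ds hpre, B_eq ds]
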